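-- pv_equiv track=rewrite | github.com/haaris272k/Problem-Solving-Collection | Hash and Counting/Lucky_integer_in_array.py | solution
-- ===== SOURCE A (Python) =====
-- def solution(arr):
--     keyequalsvalue = []
--     hashtable = {i: arr.count(i) for i in arr}
--     for k, v in hashtable.items():
--         if k == v:
--             # storing all the lucky integers
--             keyequalsvalue.append(k)
--     # checking whether there is any lucky inteher or not
--     if keyequalsvalue:
--         # finding the max lucky integer from all the lucky integers
--         return max(keyequalsvalue)
--     return -1
-- ===== SOURCE B (Python) =====
-- def solution(arr):
--     # Sort a copy and walk it once: consecutive equal values form runs; when a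
--     # run ends, if its length equals its value that value is lucky. Runs come
--     # in ascending order, so the last lucky run seen is the largest.
--     res = -1
--     prev = None
--     run = 0
--     for x in sorted(arr):
--         if prev is not None and x == prev:
--             run += 1
--         else:
--             if prev is not None and run == prev:
--                 res = prev
--             prev = x
--             run = 1
--     if prev is not None and run == prev:
--         res = prev
--     return res
-- ===== Notes on version B (the rewrite author's own statement) =====
-- stated objective: faster
-- what changed: replaces the frequency dict built by calling arr.count for every element plus a lucky-list and max() pass with sort-then-scan: one walk over sorted(arr) tracking consecutive runs, recording a run's value when its length equals it (ascending runs make the last recorded value the maximum)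
import Mathlib
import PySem

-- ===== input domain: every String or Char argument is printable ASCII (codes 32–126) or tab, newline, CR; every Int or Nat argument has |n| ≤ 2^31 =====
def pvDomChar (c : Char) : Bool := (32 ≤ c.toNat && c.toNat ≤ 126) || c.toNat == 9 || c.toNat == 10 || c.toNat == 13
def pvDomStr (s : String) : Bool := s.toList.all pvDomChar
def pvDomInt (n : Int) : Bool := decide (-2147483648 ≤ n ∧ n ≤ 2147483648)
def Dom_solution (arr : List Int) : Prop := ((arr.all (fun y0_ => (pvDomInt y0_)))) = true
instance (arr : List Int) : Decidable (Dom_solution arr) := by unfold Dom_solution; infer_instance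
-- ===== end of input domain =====

-- B replaces A's quadratic arr.count-per-element dict and lucky-list + max() pass with a
-- sort-then-scan over consecutive runs (objective: faster, measured).


-- ===== PORT A =====
def solution (arr : List Int) : Int :=
  -- hashtable = {i: arr.count(i) for i in arr}
  let hashtable : PySem.Dict Int Int :=
    arr.foldl (fun d i => d.insert i (arr.count i : Int)) PySem.Dict.empty
  -- for k, v in hashtable.items(): if k == v: keyequalsvalue.append(k)
  let keyequalsvalue : List Int :=
    hashtable.items.foldl (fun acc p => if p.1 == p.2 then acc ++ [p.1] else acc) []
  -- if keyequalsvalue: return max(keyequalsvalue); return -1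
  match PySem.List.max? keyequalsvalue (fun x => x) with
  | some m => m
  | none => -1

-- ===== PORT B =====
-- loop body: if prev is not None and x == prev: run += 1
--            else: (if prev is not None and run == prev: res = prev); prev = x; run = 1
def luckyStep (st : Int × Option Int × Int) (x : Int) : Int × Option Int × Int :=
  match st with
  | (res, some p, run) =>
      if x == p then (res, some p, run + 1)
      else ((if run == p then p else res), some x, 1)
  | (res, none, _) => (res, some x, 1)

-- final: if prev is not None and run == prev: res = prev
def luckyFlush (st : Int × Option Int × Int) : Int :=
  match st with
  | (res, some p, run) => if run == p then p else res
  | (res, none, _) => res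

def solution_alt (arr : List Int) : Int :=
  luckyFlush ((PySem.List.sorted arr (fun x => x) false).foldl luckyStep (-1, none, 0))

-- ===== PRECONDITION & SPEC =====
def Spec_solution (arr : List Int) (out : Int) : Prop := out = solution_alt arr
instance (arr : List Int) (out : Int) : Decidable (Spec_solution arr out) := by unfold Spec_solution; infer_instance

-- ===== CLAIM (what is proved, stated in full; the proofs are below) =====
def Claim_equal_solution : Prop := ∀ (arr : List Int), Dom_solution arr → Spec_solution arr (solution arr)

-- ===== LEMMAS AND PROOFS =====

-- A's comprehension dict looks up the full count for every key it contains
lemma getD_foldl_insert_count (arr l : List Int) (d : PySem.Dict Int Int) (k : Int) :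
    (l.foldl (fun d i => d.insert i (arr.count i : Int)) d).getD k 0 =
      if k ∈ l then (arr.count k : Int) else d.getD k 0 := by
  induction l generalizing d with
  | nil => simp
  | cons x t ih =>
    simp only [List.foldl_cons, ih, List.mem_cons, PySem.Dict.getD_insert]
    by_cases hk : k = x <;> simp [hk]

-- A's hashtable has the same items list as Counter(arr)
lemma itemsA_eq (arr : List Int) :
    (arr.foldl (fun d i => d.insert i (arr.count i : Int)) PySem.Dict.empty).items =
      (PySem.Dict.counter arr).items := by
  rw [PySem.Dict.items_counter]
  rw [PySem.Dict.items_eq_map_keys _ (PySem.Dict.nodup_keys_foldl_insert _ _ _ (by simp)) 0]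
  rw [PySem.Dict.keys_foldl_insert]
  simp only [PySem.Dict.keys_empty]
  have : PySem.Set.update ([] : List Int) arr = PySem.Set.ofList arr := rfl
  rw [this]
  apply List.map_congr_left
  intro k hk
  rw [getD_foldl_insert_count]
  simp [(PySem.Set.mem_ofList arr k).mp hk]

-- the lucky values of a list, ascending when the list is sorted
def luckyOf (s : List Int) : List Int :=
  s.dedup.filter (fun k => (s.count k : Int) = k)

-- any sorted nonempty list splits as a maximal head run followed by strictly larger values
lemma sorted_decomp (y : Int) (l : List Int) (h : (y :: l).Pairwise (· ≤ ·)) :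
    ∃ (m : ℕ) (t : List Int), 0 < m ∧ y :: l = List.replicate m y ++ t ∧
      t.Pairwise (· ≤ ·) ∧ (∀ z ∈ t, y < z) := by
  induction l with
  | nil => exact ⟨1, [], by simp⟩
  | cons z l' ih =>
    rcases List.pairwise_cons.mp h with ⟨hy, hl⟩
    by_cases hz : z = y
    · subst hz
      obtain ⟨m, t, hm, heq, htp, htgt⟩ := ih hl
      exact ⟨m + 1, t, by omega, by
        simpa [List.replicate_succ] using congrArg (z :: ·) heq, htp, htgt⟩
    · refine ⟨1, z :: l', by omega, by simp [List.replicate], hl, ?_⟩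
      intro w hw
      have hyz : y < z := lt_of_le_of_ne (hy z (by simp)) (Ne.symm hz)
      rcases List.mem_cons.mp hw with rfl | hw'
      · exact hyz
      · exact lt_of_lt_of_le hyz ((List.pairwise_cons.mp hl).1 w hw')

-- luckyOf over such a decomposition
lemma luckyOf_decomp (m : ℕ) (y : Int) (t : List Int) (hm : 0 < m) (ht : ∀ z ∈ t, y < z) :
    luckyOf (List.replicate m y ++ t) =
      (if (m : Int) = y then [y] else []) ++ luckyOf t := by
  have hynt : y ∉ t := fun h => lt_irrefl y (ht y h)
  have hcnty : t.count y = 0 := List.count_eq_zero.mpr hynt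
  have hded : (List.replicate m y ++ t).dedup = y :: t.dedup := by
    induction m with
    | zero => omega
    | succ m' ihm =>
      cases Nat.eq_zero_or_pos m' with
      | inl h0 => subst h0; simpa using List.dedup_cons_of_notMem hynt
      | inr hpos =>
        have hmem : y ∈ List.replicate m' y ++ t := by
          simp [List.mem_replicate]; omega
        rw [List.replicate_succ, List.cons_append, List.dedup_cons_of_mem hmem]
        exact ihm hpos
  unfold luckyOf
  rw [hded, List.filter_cons]
  have hcnt : ∀ k, (List.replicate m y ++ t).count k =
      (if k = y then (m : Int) + t.count k else (t.count k : Int)) := by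
    intro k
    rw [List.count_append, List.count_replicate]
    by_cases hk : k = y
    · subst hk; simp
    · have h2 : (y == k) = false := by simp; exact Ne.symm hk
      simp [h2, hk]
  have htail : t.dedup.filter (fun k => (((List.replicate m y ++ t).count k : Int) = k)) =
      t.dedup.filter (fun k => ((t.count k : Int) = k)) := by
    apply List.filter_congr
    intro k hk
    have hkt : k ∈ t := List.mem_dedup.mp hk
    have : k ≠ y := fun h => lt_irrefl y (h ▸ ht k hkt)
    simp [List.count_replicate, Ne.symm this]
  rw [htail]
  have hcy : ((List.replicate m y ++ t).count y : Int) = (m : Int) := by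
    rw [hcnt y]; simp [hcnty]
  by_cases hmy : (m : Int) = y
  · simp [hmy, hcnty]
  · simp only [hcnt y, hcnty, Nat.cast_zero, add_zero]
    simp [hmy]

-- getLastD steps through a cons
lemma getLastD_cons' (a d : Int) (l : List Int) : (a :: l).getLastD d = l.getLastD a := by
  cases l with
  | nil => simp
  | cons b l' => simp [List.getLastD]

-- consuming the rest of a run just increments the counter
lemma foldl_luckyStep_replicate (j : ℕ) (y res : Int) (run : Int) :
    ∀ t : List Int, (List.replicate j y ++ t).foldl luckyStep (res, some y, run) =
      t.foldl luckyStep (res, some y, run + j) := by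
  induction j generalizing run with
  | zero => simp
  | succ j' ih =>
    intro t
    rw [List.replicate_succ, List.cons_append, List.foldl_cons]
    have hstep : luckyStep (res, some y, run) y = (res, some y, run + 1) := by
      simp [luckyStep]
    rw [hstep, ih (run + 1)]
    have h3 : run + 1 + (j' : Int) = run + ((j' + 1 : ℕ) : Int) := by push_cast; ring
    rw [h3]

-- main invariant of B's scan: on a sorted list whose elements all exceed any pending value,
-- the scan returns the last lucky value, defaulting to the flushed incoming state
lemma scan_spec (n : ℕ) : ∀ s : List Int, s.length ≤ n → s.Pairwise (· ≤ ·) →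
    ∀ (res : Int) (prev : Option Int) (run : Int),
      (∀ z ∈ s, ∀ p, prev = some p → p < z) →
      luckyFlush (s.foldl luckyStep (res, prev, run)) =
        (luckyOf s).getLastD (luckyFlush (res, prev, run)) := by
  induction n with
  | zero =>
    intro s hlen _ res prev run _
    have hnil : s = [] := List.eq_nil_of_length_eq_zero (Nat.le_zero.mp hlen)
    subst hnil; simp [luckyOf]
  | succ n ih =>
    intro s hlen hpair res prev run hprev
    cases hs : s with
    | nil => subst hs; simp [luckyOf]
    | cons y l =>
      subst hs
      obtain ⟨m, t, hm, heq, htp, htgt⟩ := sorted_decomp y l hpair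
      rw [heq]
      have hrep : List.replicate m y ++ t = y :: (List.replicate (m - 1) y ++ t) := by
        cases m with
        | zero => omega
        | succ m' => simp [List.replicate_succ]
      have hstep1 : luckyStep (res, prev, run) y = (luckyFlush (res, prev, run), some y, 1) := by
        cases prev with
        | none => simp [luckyStep, luckyFlush]
        | some p =>
          have hpy : p < y := hprev y (by simp) p rfl
          have hne : (y == p) = false := by simp; omega
          simp [luckyStep, luckyFlush, hne]
      have hlt : t.length ≤ n := by
        have hlen2 : l.length + 1 = m + t.length := by
          have h4 := congrArg List.length heq
          simpa using h4
        simp only [List.length_cons] at hlen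
        omega
      rw [hrep, List.foldl_cons, hstep1, foldl_luckyStep_replicate]
      have hcast : (1 : Int) + ((m - 1 : ℕ) : Int) = (m : Int) := by omega
      rw [hcast]
      rw [ih t hlt htp _ (some y) (m : Int)
        (by intro z hz p hp; injection hp with hp'; exact hp' ▸ htgt z hz)]
      rw [← hrep, luckyOf_decomp m y t hm htgt]
      by_cases hmy : (m : Int) = y
      · have h5 : luckyFlush (luckyFlush (res, prev, run), some y, (m : Int)) = y := by
          simp [luckyFlush, hmy]
        rw [h5, if_pos hmy, List.singleton_append, getLastD_cons']
      · have hne : ((m : Int) == y) = false := by simp [hmy]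
        simp [luckyFlush, hne, hmy]

-- a running max over an ascending list of values ≥ the seed is its last element
lemma foldl_max_sorted (L : List Int) : ∀ r : Int, L.Pairwise (· ≤ ·) → (∀ y ∈ L, r ≤ y) →
    L.foldl max r = L.getLastD r := by
  induction L with
  | nil => intro r _ _; rfl
  | cons x L' ih =>
    intro r hp hr
    rcases List.pairwise_cons.mp hp with ⟨hx, hp'⟩
    have hrx : max r x = x := max_eq_right (hr x (by simp))
    rw [List.foldl_cons, hrx, ih x hp' hx, getLastD_cons']

-- the elements of A's lucky list are positive (they are counts of members)
lemma luckyA_pos (arr : List Int) :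
    ∀ m ∈ ((PySem.Dict.counter arr).items.filter
      (fun p : Int × Int => p.1 == p.2)).map (·.1), 1 ≤ m := by
  intro m hm
  simp only [List.mem_map, List.mem_filter] at hm
  obtain ⟨p, ⟨hpi, hpe⟩, hp1⟩ := hm
  rw [PySem.Dict.items_counter] at hpi
  simp only [List.mem_map] at hpi
  obtain ⟨k, hk, hkp⟩ := hpi
  have hkarr : k ∈ arr := (PySem.Set.mem_ofList arr k).mp hk
  have hcnt : 1 ≤ arr.count k := List.count_pos_iff.mpr hkarr
  have hpe' : p.1 = p.2 := by exact_mod_cast (beq_iff_eq.mp hpe)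
  subst hkp hp1
  simp only at hpe' ⊢
  rw [hpe']; exact_mod_cast hcnt

-- A is the running max, seeded at -1, of its lucky list
lemma solution_eq_foldl_max (arr : List Int) :
    solution arr = (((PySem.Dict.counter arr).items.filter
      (fun p : Int × Int => p.1 == p.2)).map (·.1)).foldl max (-1) := by
  simp only [solution]
  rw [itemsA_eq, PySem.List.foldl_append_if (p := fun p : Int × Int => p.1 == p.2) (f := (·.1))]
  simp only [List.nil_append]
  cases hM : ((PySem.Dict.counter arr).items.filter
      (fun p : Int × Int => p.1 == p.2)).map (·.1) with
  | nil => simp [PySem.List.max?]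
  | cons m t =>
    rw [PySem.List.max?_id_cons]
    simp only [List.foldl_cons]
    have hm1 : 1 ≤ m := luckyA_pos arr m (by rw [hM]; exact List.mem_cons_self ..)
    have hmax : max (-1 : Int) m = m := by omega
    rw [hmax]

theorem solution_spec : Claim_equal_solution := by
  intro arr _
  unfold Spec_solution
  -- the sorted copy B scans
  have hsperm : (PySem.List.sorted arr (fun x => x) false).Perm arr :=
    PySem.List.sorted_perm arr (fun x => x) false
  have hBpair : (PySem.List.sorted arr (fun x => x) false).Pairwise (· ≤ ·) := by
    simpa using PySem.List.sorted_pairwise (xs := arr) (key := fun x => x)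
  -- B computes the last lucky value of the sorted copy
  have hB : solution_alt arr =
      (luckyOf (PySem.List.sorted arr (fun x => x) false)).getLastD (-1) := by
    unfold solution_alt
    rw [scan_spec (PySem.List.sorted arr (fun x => x) false).length _ le_rfl hBpair
      (-1) none 0 (by intro z _ p hp; cases hp)]
    rfl
  -- both lucky lists have the same members
  have hmem2 : ∀ k, k ∈ luckyOf (PySem.List.sorted arr (fun x => x) false) ↔
      (k ∈ arr ∧ (arr.count k : Int) = k) := by
    intro k
    unfold luckyOf
    simp only [List.mem_filter, List.mem_dedup, decide_eq_true_eq]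
    rw [hsperm.count_eq, List.Perm.mem_iff hsperm]
  have hmem1 : ∀ k, k ∈ ((PySem.Dict.counter arr).items.filter
      (fun p : Int × Int => p.1 == p.2)).map (·.1) ↔
      (k ∈ arr ∧ (arr.count k : Int) = k) := by
    intro k
    rw [PySem.Dict.items_counter, List.filter_map, List.map_map]
    simp only [List.mem_map, List.mem_filter, Function.comp]
    constructor
    · rintro ⟨j, ⟨hj, hje⟩, rfl⟩
      exact ⟨(PySem.Set.mem_ofList arr j).mp hj, (beq_iff_eq.mp hje).symm⟩
    · rintro ⟨hk, hc⟩
      exact ⟨k, ⟨(PySem.Set.mem_ofList arr k).mpr hk, beq_iff_eq.mpr hc.symm⟩, rfl⟩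
  -- they are rearrangements of one another
  have hnd1 : (((PySem.Dict.counter arr).items.filter
      (fun p : Int × Int => p.1 == p.2)).map (·.1)).Nodup := by
    rw [PySem.Dict.items_counter, List.filter_map, List.map_map]
    exact ((PySem.Set.nodup_ofList arr).filter _).map (fun a b h => by
      simpa using h)
  have hnd2 : (luckyOf (PySem.List.sorted arr (fun x => x) false)).Nodup :=
    (List.nodup_dedup _).filter _
  have hperm : (((PySem.Dict.counter arr).items.filter
      (fun p : Int × Int => p.1 == p.2)).map (·.1)).Perm
      (luckyOf (PySem.List.sorted arr (fun x => x) false)) :=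
    (List.perm_ext_iff_of_nodup hnd1 hnd2).mpr (fun k => (hmem1 k).trans (hmem2 k).symm)
  -- the ascending lucky list is below-bounded by the seed -1
  have hpair2 : (luckyOf (PySem.List.sorted arr (fun x => x) false)).Pairwise (· ≤ ·) :=
    hBpair.sublist ((List.filter_sublist).trans (List.dedup_sublist _))
  have hge : ∀ y ∈ luckyOf (PySem.List.sorted arr (fun x => x) false), (-1 : Int) ≤ y := by
    intro y hy
    rcases (hmem2 y).mp hy with ⟨hmem, hc⟩
    have : 1 ≤ arr.count y := List.count_pos_iff.mpr hmem
    omega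
  rw [solution_eq_foldl_max, hperm.foldl_eq, foldl_max_sorted _ _ hpair2 hge, hB]
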